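-- pv_equiv track=rewrite | github.com/somya-cb/ai-travel-assistant | app/main.py | format_traveler_types
-- ===== SOURCE A (Python) =====
-- def format_traveler_types(types_list):
--     """Convert traveler type codes to readable names"""
--     type_map = {
--         "cultural_explorer": "Cultural Explorer",
--         "adventure_seeker": "Adventure Seeker",
--         "luxury_traveler": "Luxury Traveler",
--         "foodie": "Foodie",
--         "nature_lover": "Nature Lover",
--         "budget_backpacker": "Budget Backpacker",
--         "wellness_guru": "Wellness Guru",
--         "family_vacationer": "Family Vacationer"
--     }
--     return [type_map.get(t, t.replace('_', ' ').title()) for t in types_list]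
-- ===== SOURCE B (Python) =====
-- def format_traveler_types(types_list):
--     """Convert traveler type codes to readable names.
--
--     Every entry of A's lookup table equals its key run through
--     replace('_', ' ').title(), so the table is dropped and each code is
--     rewritten in ONE fused pass over its characters: '_' becomes ' ' and
--     each letter is upper-cased at a word start, lower-cased otherwise.
--     """
--     def readable(code):
--         out = []
--         prev_cased = False
--         for ch in code:
--             if ch == '_':
--                 out.append(' ')
--                 prev_cased = False
--             elif ch.isalpha():
--                 out.append(ch.lower() if prev_cased else ch.upper())
--                 prev_cased = True
--             else:
--                 out.append(ch)
--                 prev_cased = False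
--         return ''.join(out)
--     return [readable(t) for t in types_list]
-- ===== Notes on version B (the rewrite author's own statement) =====
-- stated objective: alternative
-- what changed: Deletes the 8-entry lookup dictionary entirely and computes each readable name in one fused per-character pass (underscore becomes a space, letters upper-cased at word starts, lower-cased otherwise), trading A's dict lookup plus replace-then-title fallback for a single explicit scan of each string.
import Mathlib
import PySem

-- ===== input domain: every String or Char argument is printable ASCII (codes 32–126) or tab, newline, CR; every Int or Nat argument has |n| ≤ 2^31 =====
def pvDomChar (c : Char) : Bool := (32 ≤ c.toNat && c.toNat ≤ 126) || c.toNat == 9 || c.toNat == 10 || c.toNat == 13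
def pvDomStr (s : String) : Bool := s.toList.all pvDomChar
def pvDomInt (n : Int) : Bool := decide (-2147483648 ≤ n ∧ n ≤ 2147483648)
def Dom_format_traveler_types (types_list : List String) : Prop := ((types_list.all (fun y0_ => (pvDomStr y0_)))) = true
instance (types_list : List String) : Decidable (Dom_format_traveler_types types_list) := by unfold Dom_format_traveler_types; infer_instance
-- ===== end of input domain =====

-- B replaces A's 8-entry lookup table + replace/title fallback with one fused per-character
-- pass (underscore → space, letters cased by word position); objective: alternative, same asymptotic cost.

-- ===== PORT A =====
-- str.title(), ported by hand (PySem has no title): a letter is upper-cased after a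
-- non-cased character, lower-cased otherwise; exact on the ASCII domain, where Python's
-- cased characters are exactly a–z/A–Z.
def pyTitleChars (cs : List Char) (prevCased : Bool) : List Char :=
  match cs with
  | [] => []
  | c :: rest =>
    if PySem.Chars.isalpha c then
      (if prevCased then PySem.Chars.lowerChar c else PySem.Chars.upperChar c)
        :: pyTitleChars rest true
    else c :: pyTitleChars rest false

-- t.replace('_', ' ').title()
def fallbackA (t : String) : String :=
  String.ofList (pyTitleChars (PySem.Str.replace t "_" " ").toList false)

def typeMapA : PySem.Dict String String :=
  PySem.Dict.mk [
    ("cultural_explorer", "Cultural Explorer"),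
    ("adventure_seeker", "Adventure Seeker"),
    ("luxury_traveler", "Luxury Traveler"),
    ("foodie", "Foodie"),
    ("nature_lover", "Nature Lover"),
    ("budget_backpacker", "Budget Backpacker"),
    ("wellness_guru", "Wellness Guru"),
    ("family_vacationer", "Family Vacationer")]

def format_traveler_types (types_list : List String) : List String :=
  types_list.map (fun t => typeMapA.getD t (fallbackA t))

-- ===== PORT B =====
-- one fused pass: '_' → ' ' (word break), letter → cased by word position, other chars kept
def readableChars (cs : List Char) (prevCased : Bool) : List Char :=
  match cs with
  | [] => []
  | c :: rest =>
    if c = '_' then ' ' :: readableChars rest false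
    else if PySem.Chars.isalpha c then
      (if prevCased then PySem.Chars.lowerChar c else PySem.Chars.upperChar c)
        :: readableChars rest true
    else c :: readableChars rest false

def format_traveler_types_alt (types_list : List String) : List String :=
  types_list.map (fun t => String.ofList (readableChars t.toList false))

-- ===== PRECONDITION & SPEC =====
def Spec_format_traveler_types (types_list : List String) (out : List String) : Prop := out = format_traveler_types_alt types_list
instance (types_list : List String) (out : List String) : Decidable (Spec_format_traveler_types types_list out) := by unfold Spec_format_traveler_types; infer_instance

-- ===== CLAIM (what is proved, stated in full; the proofs are below) =====
def Claim_equal_format_traveler_types : Prop := ∀ (types_list : List String), Dom_format_traveler_types types_list → Spec_format_traveler_types types_list (format_traveler_types types_list)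

-- ===== LEMMAS AND PROOFS =====

-- replace with a single-character pattern is a character map
theorem go_single : ∀ (l acc : List Char), PySem.Chars.replace.go ['_'] [' '] l.length l acc = acc.reverse ++ l.map (fun c => if c = '_' then ' ' else c) := by
  intro l
  induction l with
  | nil => intro acc; simp [PySem.Chars.replace.go]
  | cons c t ih =>
    intro acc
    show PySem.Chars.replace.go ['_'] [' '] (t.length + 1) (c :: t) acc = _
    rw [PySem.Chars.replace.go]
    by_cases h : c = '_'
    · subst h; simp [List.isPrefixOf, ih]
    · simp [List.isPrefixOf, h, ih]
      exact fun hc => (h hc.symm).elim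

theorem replace_single (cs : List Char) : PySem.Chars.replace cs ['_'] [' '] = cs.map (fun c => if c = '_' then ' ' else c) := by
  simpa using go_single cs []

-- B's fused pass equals A's replace-then-title: '_' is not cased, so it breaks a word
-- exactly as the ' ' it becomes does
theorem fused_eq_title_replace : ∀ (cs : List Char) (prev : Bool),
    readableChars cs prev = pyTitleChars (cs.map (fun c => if c = '_' then ' ' else c)) prev := by
  intro cs
  induction cs with
  | nil => intro prev; rfl
  | cons c rest ih =>
    intro prev
    by_cases h : c = '_'
    · subst h
      simp [readableChars, pyTitleChars, PySem.Chars.isalpha, ih]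
      exact fun hc => absurd hc (by decide)
    · simp [readableChars, pyTitleChars, h, ih]

-- the table is the transform restricted to the 8 known codes: looking up any t with the
-- replace/title fallback as default just gives the fallback
theorem getD_eq_fallback (t : String) : typeMapA.getD t (fallbackA t) = fallbackA t := by
  simp only [typeMapA, PySem.Dict.getD, PySem.Dict.get?_mk_cons]
  split_ifs with h1 h2 h3 h4 h5 h6 h7 h8
  · rw [show t = "cultural_explorer" from (eq_of_beq h1).symm]; decide
  · rw [show t = "adventure_seeker" from (eq_of_beq h2).symm]; decide
  · rw [show t = "luxury_traveler" from (eq_of_beq h3).symm]; decide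
  · rw [show t = "foodie" from (eq_of_beq h4).symm]; decide
  · rw [show t = "nature_lover" from (eq_of_beq h5).symm]; decide
  · rw [show t = "budget_backpacker" from (eq_of_beq h6).symm]; decide
  · rw [show t = "wellness_guru" from (eq_of_beq h7).symm]; decide
  · rw [show t = "family_vacationer" from (eq_of_beq h8).symm]; decide
  · rfl

theorem per_element (t : String) : typeMapA.getD t (fallbackA t) = String.ofList (readableChars t.toList false) := by
  rw [getD_eq_fallback, fallbackA, fused_eq_title_replace]
  congr 1
  rw [show (PySem.Str.replace t "_" " ").toList = PySem.Chars.replace t.toList ['_'] [' '] by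
        simp [PySem.Str.toList_replace]]
  rw [replace_single]

-- ===== VERDICT (by name: the statement is the Claim_ definition above) =====
theorem format_traveler_types_spec : Claim_equal_format_traveler_types := by
  intro types_list _
  show _ = _
  simp only [format_traveler_types, format_traveler_types_alt]
  exact List.map_congr_left (fun t _ => per_element t)
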